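-- pv_equiv track=rewrite | github.com/paulklemstine/factor | v26_production.py | _ppt_wavelet_fwd
-- ===== SOURCE A (Python) =====
-- def _ppt_wavelet_fwd(data):
--     """Forward PPT (119,120,169) integer lifting wavelet."""
--     n = len(data)
--     if n < 2:
--         return data.copy()
--     result = data.copy()
--     h = n
--     while h >= 2:
--         half = h // 2
--         temp = result[:h].copy()
--         for i in range(half):
--             s = temp[2*i]
--             d = temp[2*i+1]
--             result[i] = s + d  # low-pass
--             result[half + i] = s - d  # high-pass
--         h = half
--     return result
-- ===== SOURCE B (Python) =====
-- def _ppt_wavelet_fwd(data):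
--     """Forward PPT integer lifting wavelet, rebuilt recursively on the low-pass subband."""
--     def rec(xs, h):
--         if h < 2:
--             return xs
--         half = h // 2
--         head, tail = xs[:h], xs[h:]
--         lows = [head[2 * i] + head[2 * i + 1] for i in range(half)]
--         highs = [head[2 * i] - head[2 * i + 1] for i in range(half)]
--         return rec(lows + highs + head[2 * half:] + tail, half)
--     return rec(list(data), len(data))
-- ===== Notes on version B (the rewrite author's own statement) =====
-- stated objective: alternative
-- what changed: Replaces the in-place while loop mutating one shared array with a recursive helper that rebuilds each level as fresh lists (lows ++ highs ++ leftover ++ tail) and recurses on the halved prefix length.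
import Mathlib
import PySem

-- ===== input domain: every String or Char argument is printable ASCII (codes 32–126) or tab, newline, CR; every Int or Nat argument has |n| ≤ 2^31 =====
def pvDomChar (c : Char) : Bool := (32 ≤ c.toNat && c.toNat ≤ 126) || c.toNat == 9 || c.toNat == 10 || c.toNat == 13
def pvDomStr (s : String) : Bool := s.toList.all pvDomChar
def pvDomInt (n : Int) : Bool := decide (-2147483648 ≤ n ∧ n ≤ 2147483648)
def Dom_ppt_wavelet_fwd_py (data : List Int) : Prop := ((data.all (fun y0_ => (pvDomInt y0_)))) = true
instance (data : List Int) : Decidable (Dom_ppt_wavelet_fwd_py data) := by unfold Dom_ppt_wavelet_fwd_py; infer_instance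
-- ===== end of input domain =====

-- B rebuilds each wavelet level as fresh lists (lows ++ highs ++ leftover ++ tail) and recurses on the
-- halved prefix, instead of A's in-place index writes in a while loop; objective: alternative (same cost).

-- ===== PORT A =====
-- one iteration of A's inner for-loop body: result[i] = s + d; result[half + i] = s - d
-- (all indices here are in range, so List.getD/List.set are exact for Python's temp[..] / result[..] = ..)
def pptStepA (temp : List Int) (half : Nat) (r : List Int) (i : Nat) : List Int :=
  let s := temp.getD (2*i) 0
  let d := temp.getD (2*i+1) 0
  (r.set i (s + d)).set (half + i) (s - d)

-- A's while loop: each round snapshots temp = result[:h], runs the for-loop, then h = h // 2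
def pptLoopA (result : List Int) (h : Nat) : List Int :=
  if 2 ≤ h then
    let half := h / 2
    let temp := result.take h
    pptLoopA ((List.range half).foldl (pptStepA temp half) result) half
  else result
termination_by h
decreasing_by omega

def ppt_wavelet_fwd_py (data : List Int) : List Int :=
  if data.length < 2 then data else pptLoopA data data.length

-- ===== PORT B =====
-- B's recursive helper: rebuild level h as lows ++ highs ++ leftover ++ tail, recurse on half
def pptRecB (xs : List Int) (h : Nat) : List Int :=
  if h < 2 then xs
  else
    let half := h / 2
    let head := xs.take h
    let tail := xs.drop h
    let lows := (List.range half).map (fun i => head.getD (2*i) 0 + head.getD (2*i+1) 0)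
    let highs := (List.range half).map (fun i => head.getD (2*i) 0 - head.getD (2*i+1) 0)
    pptRecB (lows ++ highs ++ head.drop (2*half) ++ tail) half
termination_by h
decreasing_by omega

def ppt_wavelet_fwd_py_alt (data : List Int) : List Int :=
  pptRecB data data.length

-- ===== PRECONDITION & SPEC =====
def Spec_ppt_wavelet_fwd_py (data : List Int) (out : List Int) : Prop := out = ppt_wavelet_fwd_py_alt data
instance (data : List Int) (out : List Int) : Decidable (Spec_ppt_wavelet_fwd_py data out) := by unfold Spec_ppt_wavelet_fwd_py; infer_instance

-- ===== CLAIM (what is proved, stated in full; the proofs are below) =====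
def Claim_equal_ppt_wavelet_fwd_py : Prop := ∀ (data : List Int), Dom_ppt_wavelet_fwd_py data → Spec_ppt_wavelet_fwd_py data (ppt_wavelet_fwd_py data)

-- ===== LEMMAS AND PROOFS =====

theorem getD_set_int (l : List Int) (i j : Nat) (a : Int) :
    (l.set i a).getD j 0 = if j = i ∧ j < l.length then a else l.getD j 0 := by
  simp [List.getD, List.getElem?_set]
  split_ifs with h1 h2 h3 <;> simp_all
  omega

theorem pptFold_length (temp : List Int) (half : Nat) (l : List Nat) (r : List Int) :
    (l.foldl (pptStepA temp half) r).length = r.length := by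
  induction l generalizing r with
  | nil => rfl
  | cons x xs ih => simp [List.foldl, pptStepA, ih]

-- after m steps of the inner loop: positions < m hold lows, half ≤ _ < half+m hold highs, rest untouched
theorem pptFold_getD (temp r : List Int) (half m j : Nat)
    (hm : m ≤ half) (hj : j < r.length) :
    ((List.range m).foldl (pptStepA temp half) r).getD j 0 =
      if j < m then temp.getD (2*j) 0 + temp.getD (2*j+1) 0
      else if half ≤ j ∧ j < half + m then temp.getD (2*(j-half)) 0 - temp.getD (2*(j-half)+1) 0
      else r.getD j 0 := by
  induction m with
  | zero => simp
  | succ k ih =>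
    rw [List.range_succ, List.foldl_append]
    have hlen : ((List.range k).foldl (pptStepA temp half) r).length = r.length :=
      pptFold_length _ _ _ _
    simp only [List.foldl_cons, List.foldl_nil]
    rw [pptStepA]
    rw [getD_set_int, getD_set_int]
    simp only [List.length_set, hlen]
    rw [ih (by omega)]
    split_ifs <;> first | rfl | omega | (congr 2 <;> omega)

-- one full inner loop turns the first 2*half entries of r into lows ++ highs
theorem pptLevel_eq (temp r : List Int) (half : Nat)
    (hh : half + half ≤ r.length) :
    (List.range half).foldl (pptStepA temp half) r =
      (List.range half).map (fun i => temp.getD (2*i) 0 + temp.getD (2*i+1) 0) ++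
      (List.range half).map (fun i => temp.getD (2*i) 0 - temp.getD (2*i+1) 0) ++
      r.drop (2*half) := by
  have hlen : ((List.range half).foldl (pptStepA temp half) r).length = r.length :=
    pptFold_length _ _ _ _
  apply List.ext_getElem
  · simp [hlen]; omega
  · intro j h1 h2
    rw [← List.getD_eq_getElem _ 0, ← List.getD_eq_getElem _ 0]
    rw [pptFold_getD temp r half half j le_rfl (by omega : j < r.length)]
    simp only [List.getD, List.getElem?_append, List.length_map, List.length_range,
      List.getElem?_map, List.getElem?_drop]
    split_ifs <;> simp_all <;> try omega
    all_goals try { rw [List.getElem?_range (by omega)]; simp }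
    all_goals { rw [show 2*half + (j - (half+half)) = j by omega, List.getElem?_eq_getElem h1]; simp }

theorem drop_take_drop (r : List Int) (m h : Nat) (hm : m ≤ h) :
    (r.take h).drop m ++ r.drop h = r.drop m := by
  rw [List.drop_take]
  have : r.drop h = (r.drop m).drop (h - m) := by rw [List.drop_drop]; congr 1; omega
  rw [this, List.take_append_drop]

theorem pptLoopA_eq_pptRecB (h : Nat) (r : List Int) (hr : h ≤ r.length) :
    pptLoopA r h = pptRecB r h := by
  induction h using Nat.strong_induction_on generalizing r with
  | _ h ih =>
    rw [pptLoopA, pptRecB]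
    by_cases hc : 2 ≤ h
    · rw [if_pos hc, if_neg (by omega)]
      dsimp only
      have hh : h/2 + h/2 ≤ r.length := by omega
      rw [pptLevel_eq (r.take h) r (h/2) hh]
      rw [List.append_assoc (_ ++ _), drop_take_drop r (2*(h/2)) h (by omega)]
      apply ih (h/2) (by omega)
      simp
    · rw [if_neg hc, if_pos (by omega)]

-- ===== VERDICT (by name: the statement is the Claim_ definition above) =====
theorem ppt_wavelet_fwd_py_spec : Claim_equal_ppt_wavelet_fwd_py := by
  intro data _
  unfold Spec_ppt_wavelet_fwd_py ppt_wavelet_fwd_py ppt_wavelet_fwd_py_alt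
  split
  · rw [pptRecB]; simp; omega
  · exact pptLoopA_eq_pptRecB data.length data le_rfl
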